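-- pv_equiv track=rewrite | github.com/ajwwja777/CS61A | projects/cats/cats.py | shifty_shifts
-- ===== SOURCE A (Python) =====
-- def shifty_shifts(start, goal, limit):
--     """A diff function for autocorrect that determines how many letters
--     in START need to be substituted to create GOAL, then adds the difference in
--     their lengths.
--     """
--     # BEGIN PROBLEM 6
--     # assert False, 'Remove this line'
--     if limit == -1:
--         return 0
--     elif len(start) == 0 or len(goal) == 0:
--         return max(len(goal), len(start))
--     elif start[0] == goal[0]:
--         return shifty_shifts(start[1:], goal[1:], limit)
--     elif start[0] != goal[0]:
--         return shifty_shifts(start[1:], goal[1:], limit - 1) + 1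
-- ===== SOURCE B (Python) =====
-- def shifty_shifts(start, goal, limit):
--     n = min(len(start), len(goal))
--     subs = 0
--     for i in range(n):
--         if limit - subs == -1:
--             return subs
--         if start[i] != goal[i]:
--             subs += 1
--     if limit - subs == -1:
--         return subs
--     return subs + abs(len(start) - len(goal))
-- ===== Notes on version B (the rewrite author's own statement) =====
-- stated objective: faster
-- what changed: Replaced the recursion that slices both strings at every step with a single index-based loop that keeps a substitution counter and stops as soon as the budget is exhausted.
import Mathlib
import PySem

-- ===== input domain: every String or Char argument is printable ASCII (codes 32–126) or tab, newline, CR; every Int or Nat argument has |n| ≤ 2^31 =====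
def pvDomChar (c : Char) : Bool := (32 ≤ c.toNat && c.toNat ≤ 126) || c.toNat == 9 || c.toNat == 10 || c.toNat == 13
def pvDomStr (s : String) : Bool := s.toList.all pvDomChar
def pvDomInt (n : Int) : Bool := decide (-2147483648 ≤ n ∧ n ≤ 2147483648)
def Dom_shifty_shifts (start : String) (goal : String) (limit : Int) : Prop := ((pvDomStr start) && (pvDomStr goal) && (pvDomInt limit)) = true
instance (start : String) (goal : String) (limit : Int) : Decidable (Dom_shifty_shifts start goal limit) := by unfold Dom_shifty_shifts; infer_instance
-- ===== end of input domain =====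

-- ===== PORT A =====
-- recursion on the two character lists; transliteration of A's slicing recursion
def shiftyARec : List Char → List Char → Int → Int
  | s, g, limit =>
    if limit = -1 then 0
    else
      match s, g with
      | [], g' => max ((g'.length : Int)) ((([] : List Char).length : Int))
      | s', [] => max ((([] : List Char).length : Int)) ((s'.length : Int))
      | a :: s', b :: g' =>
        if a = b then shiftyARec s' g' limit
        else shiftyARec s' g' (limit - 1) + 1

def shifty_shifts (start : String) (goal : String) (limit : Int) : Int :=
  shiftyARec start.toList goal.toList limit

-- ===== PORT B =====
-- Source B's index loop over the common prefix, carrying the substitution counter `subs`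
def shiftyBLoop : List Char → List Char → Int → Int → Int
  | a :: s', b :: g', limit, subs =>
    if limit - subs = -1 then subs
    else shiftyBLoop s' g' limit (if a ≠ b then subs + 1 else subs)
  | s, g, limit, subs =>
    if limit - subs = -1 then subs
    else subs + ((((s.length : Int) - (g.length : Int)).natAbs : Int))  -- abs(len(start)-len(goal))

def shifty_shifts_alt (start : String) (goal : String) (limit : Int) : Int :=
  shiftyBLoop start.toList goal.toList limit 0

-- ===== PRECONDITION & SPEC =====
def Spec_shifty_shifts (start : String) (goal : String) (limit : Int) (out : Int) : Prop := out = shifty_shifts_alt start goal limit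
instance (start : String) (goal : String) (limit : Int) (out : Int) : Decidable (Spec_shifty_shifts start goal limit out) := by unfold Spec_shifty_shifts; infer_instance

-- ===== CLAIM (what is proved, stated in full; the proofs are below) =====
def Claim_equal_shifty_shifts : Prop := ∀ (start : String) (goal : String) (limit : Int), Dom_shifty_shifts start goal limit → Spec_shifty_shifts start goal limit (shifty_shifts start goal limit)

-- ===== LEMMAS AND PROOFS =====
theorem shiftyBLoop_eq (s : List Char) :
    ∀ (g : List Char) (limit subs : Int),
      shiftyBLoop s g limit subs = subs + shiftyARec s g (limit - subs) := by
  induction s with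
  | nil =>
    intro g limit subs
    cases g <;> simp only [shiftyBLoop, shiftyARec, List.length_nil, List.length_cons] <;> split_ifs <;> omega
  | cons a s' ih =>
    intro g limit subs
    cases g with
    | nil => simp only [shiftyBLoop, shiftyARec, List.length_nil, List.length_cons]; split_ifs <;> omega
    | cons b g' =>
      by_cases hl : limit - subs = -1
      · simp [shiftyBLoop, shiftyARec, hl]
      · by_cases hab : a = b
        · simp [shiftyBLoop, shiftyARec, hl, hab, ih]
        · simp [shiftyBLoop, shiftyARec, hl, hab, ih]
          have : limit - (subs + 1) = limit - subs - 1 := by ring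
          rw [this]; ring

-- ===== VERDICT (by name: the statement is the Claim_ definition above) =====
theorem shifty_shifts_spec : Claim_equal_shifty_shifts := by
  intro start goal limit _
  unfold Spec_shifty_shifts shifty_shifts shifty_shifts_alt
  rw [shiftyBLoop_eq]
  simp
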